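-- pv_equiv track=rewrite | github.com/chanbbee0420/21-71308090 | programmers/level1/mock_test.py | solution
-- ===== SOURCE A (Python) =====
-- def solution(answers):
--     ans = []
--     res = [0, 0, 0]
--     s1 = [1, 2, 3, 4, 5]
--     s2 = [2, 1, 2, 3, 2, 4, 2, 5]
--     s3 = [3, 3, 1, 1, 2, 2, 4, 4, 5, 5]
--
--     for i in range(len(answers)):
--         if answers[i] == s1[i % len(s1)]:
--             res[0] += 1
--         if answers[i] == s2[i % len(s2)]:
--             res[1] += 1
--         if answers[i] == s3[i % len(s3)]:
--             res[2] += 1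
--
--     if res[0] == max(res):
--         ans.append(1)
--     if res[1] == max(res):
--         ans.append(2)
--     if res[2] == max(res):
--         ans.append(3)
--
--     return ans
-- ===== SOURCE B (Python) =====
-- def solution(answers):
--     patterns = [[1, 2, 3, 4, 5],
--                 [2, 1, 2, 3, 2, 4, 2, 5],
--                 [3, 3, 1, 1, 2, 2, 4, 4, 5, 5]]
--     # All three patterns repeat with period dividing 40 (= lcm(5, 8, 10)), so a
--     # histogram keyed by (position mod 40, answer) carries enough information to
--     # score every pattern without looking at the answers again.
--     hist = {}
--     for i, a in enumerate(answers):
--         key = (i % 40, a)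
--         hist[key] = hist.get(key, 0) + 1
--     scores = []
--     for p in patterns:
--         s = 0
--         for j in range(40):
--             s += hist.get((j, p[j % len(p)]), 0)
--         scores.append(s)
--     best = max(scores)
--     return [k + 1 for k in range(3) if scores[k] == best]
-- ===== Notes on version B (the rewrite author's own statement) =====
-- stated objective: alternative
-- what changed: B replaces A's per-element comparison against the three cyclic keys by a frequency table: one pass builds a histogram of (index mod 40, answer) pairs (40 = lcm of the pattern lengths), and each pattern's score is then obtained by 40 table lookups without rescanning the answers; argmax is computed from the scores list.
import Mathlib
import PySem

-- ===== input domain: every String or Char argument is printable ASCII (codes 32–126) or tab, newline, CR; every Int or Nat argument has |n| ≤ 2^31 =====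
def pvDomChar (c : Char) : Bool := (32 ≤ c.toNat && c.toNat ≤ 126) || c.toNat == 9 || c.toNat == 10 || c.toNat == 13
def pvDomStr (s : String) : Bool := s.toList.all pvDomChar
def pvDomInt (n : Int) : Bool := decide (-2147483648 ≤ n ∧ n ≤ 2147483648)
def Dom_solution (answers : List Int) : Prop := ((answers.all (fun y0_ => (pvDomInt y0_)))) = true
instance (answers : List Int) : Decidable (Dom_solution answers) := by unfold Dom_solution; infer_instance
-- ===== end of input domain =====

-- B trades A's fused checking pass for a (index mod 40, answer) histogram built once,
-- from which each pattern's score is read off by 40 table lookups (alternative; same O(n) cost).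

-- ===== PORT A =====
-- A's three answer keys (A defines them as locals s1, s2, s3)
def pvS1 : List Int := [1, 2, 3, 4, 5]
def pvS2 : List Int := [2, 1, 2, 3, 2, 4, 2, 5]
def pvS3 : List Int := [3, 3, 1, 1, 2, 2, 4, 4, 5, 5]

-- A's res = [r0, r1, r2] list is carried as a triple; the loop over range(len(answers))
-- is the fold over List.range; answers[i] and sK[i % len(sK)] are always in range so getD is exact.
def solution (answers : List Int) : List Int :=
  let res := (List.range answers.length).foldl
    (fun (r : Int × Int × Int) i =>
      let r0 := if answers.getD i 0 = pvS1.getD (i % pvS1.length) 0 then r.1 + 1 else r.1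
      let r1 := if answers.getD i 0 = pvS2.getD (i % pvS2.length) 0 then r.2.1 + 1 else r.2.1
      let r2 := if answers.getD i 0 = pvS3.getD (i % pvS3.length) 0 then r.2.2 + 1 else r.2.2
      (r0, r1, r2)) (0, 0, 0)
  let m := max res.1 (max res.2.1 res.2.2)   -- max(res) on the 3-element list
  let ans0 : List Int := if res.1 = m then [1] else []
  let ans1 : List Int := if res.2.1 = m then ans0 ++ [2] else ans0
  let ans2 : List Int := if res.2.2 = m then ans1 ++ [3] else ans1
  ans2

-- ===== PORT B =====
def pvPatterns : List (List Int) :=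
  [[1, 2, 3, 4, 5], [2, 1, 2, 3, 2, 4, 2, 5], [3, 3, 1, 1, 2, 2, 4, 4, 5, 5]]

-- hist = {}; for i, a in enumerate(answers): key = (i % 40, a); hist[key] = hist.get(key, 0) + 1
def pvHist (answers : List Int) : PySem.Dict (Int × Int) Int :=
  (PySem.List.enumerate answers 0).foldl
    (fun d ia =>
      let key := (PySem.Int.mod ia.1 40, ia.2)
      d.insert key (d.getD key 0 + 1))
    PySem.Dict.empty

-- s = 0; for j in range(40): s += hist.get((j, p[j % len(p)]), 0)
def pvScoreB (hist : PySem.Dict (Int × Int) Int) (p : List Int) : Int :=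
  (PySem.List.pyRange 0 40 1).foldl
    (fun s j => s + hist.getD (j, PySem.List.pyGetD p (PySem.Int.mod j (p.length : Int)) 0) 0) 0

def solution_alt (answers : List Int) : List Int :=
  let hist := pvHist answers
  let scores := pvPatterns.map (fun p => pvScoreB hist p)
  let best := match PySem.List.max? scores (fun y => y) with   -- scores is never empty
    | some m => m
    | none => 0
  (PySem.List.pyRange 0 3 1).filterMap
    (fun k => if PySem.List.pyGetD scores k 0 = best then some (k + 1) else none)

-- ===== PRECONDITION & SPEC =====
def Spec_solution (answers : List Int) (out : List Int) : Prop := out = solution_alt answers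
instance (answers : List Int) (out : List Int) : Decidable (Spec_solution answers out) := by unfold Spec_solution; infer_instance

-- ===== CLAIM (what is proved, stated in full; the proofs are below) =====
def Claim_equal_solution : Prop := ∀ (answers : List Int), Dom_solution answers → Spec_solution answers (solution answers)

-- ===== LEMMAS AND PROOFS =====

-- A's fused triple loop splits into three independent folds.
theorem pv_foldl_triple (l : List Nat) (g1 g2 g3 : Int → Nat → Int) (a b c : Int) :
    l.foldl (fun (r : Int × Int × Int) i => (g1 r.1 i, g2 r.2.1 i, g3 r.2.2 i)) (a, b, c)
      = (l.foldl g1 a, l.foldl g2 b, l.foldl g3 c) := by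
  induction l generalizing a b c with
  | nil => rfl
  | cons x t ih => simpa using ih _ _ _

-- the histogram's entries are occurrence counts of (i % 40, answers[i]) keys
theorem pvHist_getD (answers : List Int) (k : Int × Int) :
    (pvHist answers).getD k 0
      = (((PySem.List.enumerate answers 0).map
            (fun ia => (PySem.Int.mod ia.1 40, ia.2))).count k : Int) := by
  have h : pvHist answers
      = ((PySem.List.enumerate answers 0).map
            (fun ia => (PySem.Int.mod ia.1 40, ia.2))).foldl
          (fun d key => d.insert key (d.getD key 0 + 1)) PySem.Dict.empty := by
    rw [List.foldl_map]; rfl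
  rw [h, PySem.Dict.getD_foldl_insert_add_one, PySem.Dict.getD_empty, zero_add]

-- a countP over a nodup list of a predicate pinning the element
theorem pv_countP_pair (L : List Int) (hL : L.Nodup) (g : Int → Int) (k : Int × Int) :
    L.countP (fun j => decide ((j, g j) = k))
      = if k.1 ∈ L ∧ g k.1 = k.2 then 1 else 0 := by
  obtain ⟨k1, k2⟩ := k
  simp only [Prod.mk.injEq]
  induction L with
  | nil => simp
  | cons a t ih =>
    rcases List.nodup_cons.mp hL with ⟨ha, ht⟩
    rw [List.countP_cons, ih ht]
    by_cases h1 : a = k1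
    · subst h1
      by_cases h2 : g a = k2
      · simp [h2, ha]
      · simp [h2]
    · by_cases hm : k1 ∈ t <;> by_cases h2 : g k1 = k2 <;>
        simp [h1, hm, h2, Ne.symm h1]

-- B's score, read through the histogram, equals A's per-pattern counting fold,
-- for any nonempty pattern whose length divides 40.
theorem pv_score_eq (p : List Int) (hp : p ≠ []) (hd : (p.length : Int) ∣ 40)
    (answers : List Int) :
    pvScoreB (pvHist answers) p
      = (List.range answers.length).foldl
          (fun s i => if answers.getD i 0 = p.getD (i % p.length) 0 then s + 1 else s) 0 := by
  have hlpos : 0 < p.length := List.length_pos_iff.mpr hp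
  induction answers using List.reverseRecOn with
  | nil =>
    unfold pvScoreB
    rw [PySem.List.foldl_add]
    simp [pvHist_getD, PySem.List.enumerate_nil]
  | append_singleton xs x ih =>
    -- A's side: peel off the last index
    have hA : (List.range (xs ++ [x]).length).foldl
        (fun s i => if (xs ++ [x]).getD i 0 = p.getD (i % p.length) 0 then s + 1 else s) (0 : Int)
        = (List.range xs.length).foldl
            (fun s i => if xs.getD i 0 = p.getD (i % p.length) 0 then s + 1 else s) (0 : Int)
          + (if x = p.getD (xs.length % p.length) 0 then (1 : Int) else 0) := by
      rw [List.length_append, List.length_singleton, List.range_succ, List.foldl_append]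
      have hcongr :
          (List.range xs.length).foldl
            (fun s i => if (xs ++ [x]).getD i 0 = p.getD (i % p.length) 0 then s + 1 else s) (0 : Int)
          = (List.range xs.length).foldl
            (fun s i => if xs.getD i 0 = p.getD (i % p.length) 0 then s + 1 else s) (0 : Int) := by
        apply PySem.List.foldl_congr_mem
        intro acc i hi
        have hlt : i < xs.length := List.mem_range.mp hi
        rw [List.getD_append _ _ _ _ hlt]
      rw [hcongr]
      have hget : (xs ++ [x]).getD xs.length 0 = x := by
        rw [List.getD_eq_getElem?_getD]
        simp
      simp only [List.foldl_cons, List.foldl_nil, hget]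
      split_ifs <;> ring
    have hB : pvScoreB (pvHist (xs ++ [x])) p
        = pvScoreB (pvHist xs) p
          + (if x = p.getD (xs.length % p.length) 0 then 1 else 0) := by
      unfold pvScoreB
      rw [PySem.List.foldl_add, PySem.List.foldl_add, zero_add, zero_add]
      have hkeys : (PySem.List.enumerate (xs ++ [x]) 0).map
            (fun ia => (PySem.Int.mod ia.1 40, ia.2))
          = ((PySem.List.enumerate xs 0).map
              (fun ia => (PySem.Int.mod ia.1 40, ia.2)))
            ++ [(PySem.Int.mod (xs.length : Int) 40, x)] := by
        rw [PySem.List.enumerate_append]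
        simp [PySem.List.enumerate]
      have hsplit : ∀ j : Int,
          (pvHist (xs ++ [x])).getD (j, PySem.List.pyGetD p (PySem.Int.mod j (p.length : Int)) 0) 0
          = (pvHist xs).getD (j, PySem.List.pyGetD p (PySem.Int.mod j (p.length : Int)) 0) 0
            + (if (j, PySem.List.pyGetD p (PySem.Int.mod j (p.length : Int)) 0)
                 = (PySem.Int.mod (xs.length : Int) 40, x) then 1 else 0) := by
        intro j
        rw [pvHist_getD, pvHist_getD, hkeys, List.count_append, Nat.cast_add]
        congr 1
        by_cases h : (j, PySem.List.pyGetD p (PySem.Int.mod j (p.length : Int)) 0)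
            = (PySem.Int.mod (xs.length : Int) 40, x)
        · rw [if_pos h, h]
          simp
        · rw [if_neg h]
          norm_cast
          rw [List.count_eq_zero]
          simpa using h
      have hmaps :
          ((PySem.List.pyRange 0 40 1).map
            (fun j => (pvHist (xs ++ [x])).getD
              (j, PySem.List.pyGetD p (PySem.Int.mod j (p.length : Int)) 0) 0))
          = ((PySem.List.pyRange 0 40 1).map
              (fun j => (pvHist xs).getD
                (j, PySem.List.pyGetD p (PySem.Int.mod j (p.length : Int)) 0) 0
              + (if (j, PySem.List.pyGetD p (PySem.Int.mod j (p.length : Int)) 0)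
                   = (PySem.Int.mod (xs.length : Int) 40, x) then 1 else 0))) :=
        List.map_congr_left (fun j _ => hsplit j)
      rw [hmaps, PySem.List.sum_map_add_int]
      congr 1
      -- the indicator sum: 1 iff the new element matches the pattern at its position
      have hrw : (fun j : Int =>
            if (j, PySem.List.pyGetD p (PySem.Int.mod j (p.length : Int)) 0)
                 = (PySem.Int.mod (xs.length : Int) 40, x) then (1 : Int) else 0)
          = (fun j : Int =>
            if (decide ((j, PySem.List.pyGetD p (PySem.Int.mod j (p.length : Int)) 0)
                 = (PySem.Int.mod (xs.length : Int) 40, x))) = true then (1 : Int) else 0) := by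
        funext j
        simp
      rw [hrw, PySem.List.sum_map_ite_one_zero]
      rw [pv_countP_pair _ (PySem.List.nodup_pyRange_one 0 40)]
      have hmod40 : PySem.Int.mod (xs.length : Int) 40 = ((xs.length % 40 : Nat) : Int) := by
        rw [PySem.Int.mod_eq_emod_of_pos (by norm_num)]
        push_cast
        rfl
      have hmem : PySem.Int.mod (xs.length : Int) 40 ∈ PySem.List.pyRange 0 40 1 := by
        rw [PySem.List.mem_pyRange_one]
        exact ⟨PySem.Int.mod_nonneg _ (by norm_num), PySem.Int.mod_lt _ (by norm_num)⟩
      have hidx : PySem.Int.mod (PySem.Int.mod (xs.length : Int) 40) (p.length : Int)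
          = ((xs.length % p.length : Nat) : Int) := by
        rw [PySem.Int.mod_eq_emod_of_pos (b := (p.length : Int)) (by exact_mod_cast hlpos),
            PySem.Int.mod_eq_emod_of_pos (by norm_num),
            Int.emod_emod_of_dvd _ hd]
        push_cast
        rfl
      have hg : PySem.List.pyGetD p
            (PySem.Int.mod (PySem.Int.mod (xs.length : Int) 40) (p.length : Int)) 0
          = p.getD (xs.length % p.length) 0 := by
        rw [hidx, PySem.List.pyGetD_natCast]
      by_cases hx : x = p.getD (xs.length % p.length) 0
      · rw [if_pos ⟨hmem, by rw [hg, hx]⟩, if_pos hx]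
        norm_num
      · rw [if_neg (by rintro ⟨-, h2⟩; exact hx (by rw [hg] at h2; exact h2.symm)), if_neg hx]
        norm_num
    rw [hB, ih]
    exact hA.symm

-- ===== VERDICT (by name: the statement is the Claim_ definition above) =====
set_option maxRecDepth 10000 in
set_option maxHeartbeats 1600000 in
theorem solution_spec : Claim_equal_solution := by
  intro answers hdom
  clear hdom
  unfold Spec_solution solution solution_alt
  simp only [pvPatterns, List.map]
  have hres := pv_foldl_triple (List.range answers.length)
    (fun a i => if answers.getD i 0 = pvS1.getD (i % pvS1.length) 0 then a + 1 else a)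
    (fun a i => if answers.getD i 0 = pvS2.getD (i % pvS2.length) 0 then a + 1 else a)
    (fun a i => if answers.getD i 0 = pvS3.getD (i % pvS3.length) 0 then a + 1 else a)
    0 0 0
  rw [show (fun (r : Int × Int × Int) i =>
      let r0 := if answers.getD i 0 = pvS1.getD (i % pvS1.length) 0 then r.1 + 1 else r.1
      let r1 := if answers.getD i 0 = pvS2.getD (i % pvS2.length) 0 then r.2.1 + 1 else r.2.1
      let r2 := if answers.getD i 0 = pvS3.getD (i % pvS3.length) 0 then r.2.2 + 1 else r.2.2
      (r0, r1, r2)) = (fun (r : Int × Int × Int) i =>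
      ((fun a i => if answers.getD i 0 = pvS1.getD (i % pvS1.length) 0 then a + 1 else a) r.1 i,
       (fun a i => if answers.getD i 0 = pvS2.getD (i % pvS2.length) 0 then a + 1 else a) r.2.1 i,
       (fun a i => if answers.getD i 0 = pvS3.getD (i % pvS3.length) 0 then a + 1 else a) r.2.2 i)) from rfl,
    hres]
  simp only [show pvScoreB (pvHist answers) [1, 2, 3, 4, 5]
      = (List.range answers.length).foldl
        (fun s i => if answers.getD i 0 = pvS1.getD (i % pvS1.length) 0 then s + 1 else s) 0 from
      pv_score_eq pvS1 (by decide) (by decide) answers,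
    show pvScoreB (pvHist answers) [2, 1, 2, 3, 2, 4, 2, 5]
      = (List.range answers.length).foldl
        (fun s i => if answers.getD i 0 = pvS2.getD (i % pvS2.length) 0 then s + 1 else s) 0 from
      pv_score_eq pvS2 (by decide) (by decide) answers,
    show pvScoreB (pvHist answers) [3, 3, 1, 1, 2, 2, 4, 4, 5, 5]
      = (List.range answers.length).foldl
        (fun s i => if answers.getD i 0 = pvS3.getD (i % pvS3.length) 0 then s + 1 else s) 0 from
      pv_score_eq pvS3 (by decide) (by decide) answers]
  set a : Int := (List.range answers.length).foldl
      (fun s i => if answers.getD i 0 = pvS1.getD (i % pvS1.length) 0 then s + 1 else s) (0 : Int) with ha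
  set b : Int := (List.range answers.length).foldl
      (fun s i => if answers.getD i 0 = pvS2.getD (i % pvS2.length) 0 then s + 1 else s) (0 : Int) with hb
  set c : Int := (List.range answers.length).foldl
      (fun s i => if answers.getD i 0 = pvS3.getD (i % pvS3.length) 0 then s + 1 else s) (0 : Int) with hc
  clear_value a b c
  clear ha hb hc hres answers
  rw [show PySem.List.pyRange 0 3 1 = [0, 1, 2] from by decide]
  simp only [PySem.List.max?_id_cons, List.foldl, List.filterMap_cons, List.filterMap_nil]
  rw [show ∀ u v w : Int, PySem.List.pyGetD [u, v, w] 0 0 = u from fun _ _ _ => rfl,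
      show ∀ u v w : Int, PySem.List.pyGetD [u, v, w] 1 0 = v from fun _ _ _ => rfl,
      show ∀ u v w : Int, PySem.List.pyGetD [u, v, w] 2 0 = w from fun _ _ _ => rfl]
  rw [← max_assoc]
  split_ifs <;> norm_num
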